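-- pv_equiv track=rewrite | github.com/AbdullahAlzariqi/RAG_Eval | utils/mapper copy.py | process_duplicates
-- ===== SOURCE A (Python) =====
-- from typing import List, Dict, Tuple, Set
-- from typing import List, Dict
--
-- def process_duplicates(strings: List[str]) -> Tuple[List[str], List[str]]:
--     """
--     Remove duplicates from a list of strings and return the duplicate items.
--
--     Args:
--         strings (list): List of strings to process
--
--     Returns:
--         tuple: (list of unique strings, list of duplicate strings)
--     """
--     seen = set()
--     duplicates = set()
--
--     # Find duplicates while preserving order
--     result = []
--     for item in strings:
--         if item in seen:
--             duplicates.add(item)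
--         else:
--             result.append(item)
--             seen.add(item)
--
--     return result, sorted(list(duplicates))
-- ===== SOURCE B (Python) =====
-- def process_duplicates(strings):
--     """Count-then-filter: one counting pass, then unique = dict.fromkeys order,
--     duplicates = sorted keys with count >= 2."""
--     counts = {}
--     for s in strings:
--         counts[s] = counts.get(s, 0) + 1
--     unique = list(dict.fromkeys(strings))
--     duplicates = sorted(s for s, c in counts.items() if c >= 2)
--     return unique, duplicates
-- ===== Notes on version B (the rewrite author's own statement) =====
-- stated objective: simpler
-- what changed: Replaces the single accumulating pass maintaining seen/duplicates sets with a count-then-filter decomposition: one frequency-counting pass, then unique via dict.fromkeys and duplicates via sorted keys with count >= 2.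
import Mathlib
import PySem

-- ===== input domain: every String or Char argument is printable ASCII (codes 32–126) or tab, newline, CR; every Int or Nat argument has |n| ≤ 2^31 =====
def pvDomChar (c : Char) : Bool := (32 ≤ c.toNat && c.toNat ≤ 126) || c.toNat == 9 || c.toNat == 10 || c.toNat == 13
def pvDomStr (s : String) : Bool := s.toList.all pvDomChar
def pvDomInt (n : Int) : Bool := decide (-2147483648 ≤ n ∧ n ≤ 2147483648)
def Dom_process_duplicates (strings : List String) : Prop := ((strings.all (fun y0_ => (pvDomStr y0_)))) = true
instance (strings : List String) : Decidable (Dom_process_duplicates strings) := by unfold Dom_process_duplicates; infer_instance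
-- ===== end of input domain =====

-- B replaces A's single accumulating pass (seen/duplicates sets) by a count-then-filter
-- decomposition (frequency table, then two independent derivations); objective: simpler.

-- ===== PORT A =====
def process_duplicates (strings : List String) : List String × List String :=
  let st := strings.foldl
    (fun (st : PySem.Set String × PySem.Set String × List String) item =>
      if PySem.Set.contains st.1 item then (st.1, PySem.Set.add st.2.1 item, st.2.2)
      else (PySem.Set.add st.1 item, st.2.1, st.2.2 ++ [item]))
    (PySem.Set.empty, PySem.Set.empty, [])
  (st.2.2, PySem.List.sorted st.2.1 (fun x => x) false)

-- ===== PORT B =====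
def process_duplicates_alt (strings : List String) : List String × List String :=
  let counts := strings.foldl (fun (d : PySem.Dict String Int) s => d.modify s 0 (· + 1)) PySem.Dict.empty
  let unique := PySem.List.dedup strings
  let duplicates :=
    PySem.List.sorted ((counts.items.filter (fun p => 2 ≤ p.2)).map Prod.fst) (fun x => x) false
  (unique, duplicates)

-- ===== PRECONDITION & SPEC =====
def Spec_process_duplicates (strings : List String) (out : List String × List String) : Prop := out = process_duplicates_alt strings
instance (strings : List String) (out : List String × List String) : Decidable (Spec_process_duplicates strings out) := by unfold Spec_process_duplicates; infer_instance

-- ===== CLAIM (what is proved, stated in full; the proofs are below) =====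
def Claim_equal_process_duplicates : Prop := ∀ (strings : List String), Dom_process_duplicates strings → Spec_process_duplicates strings (process_duplicates strings)

-- ===== LEMMAS AND PROOFS =====

-- Loop invariant for A's single pass: after processing prefix p, seen and result both
-- equal set(p) (first occurrences in order) and duplicates holds exactly the items
-- occurring at least twice in p.
theorem pd_loop_inv (rs : List String) : ∀ (p : List String) (D : List String),
    D.Nodup → (∀ x, x ∈ D ↔ 2 ≤ p.count x) →
    (rs.foldl
      (fun (st : PySem.Set String × PySem.Set String × List String) item =>
        if PySem.Set.contains st.1 item then (st.1, PySem.Set.add st.2.1 item, st.2.2)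
        else (PySem.Set.add st.1 item, st.2.1, st.2.2 ++ [item]))
      (PySem.Set.ofList p, D, PySem.Set.ofList p)).2.2 = PySem.Set.ofList (p ++ rs) ∧
    ((rs.foldl
      (fun (st : PySem.Set String × PySem.Set String × List String) item =>
        if PySem.Set.contains st.1 item then (st.1, PySem.Set.add st.2.1 item, st.2.2)
        else (PySem.Set.add st.1 item, st.2.1, st.2.2 ++ [item]))
      (PySem.Set.ofList p, D, PySem.Set.ofList p)).2.1.Nodup ∧
     ∀ x, x ∈ (rs.foldl
      (fun (st : PySem.Set String × PySem.Set String × List String) item =>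
        if PySem.Set.contains st.1 item then (st.1, PySem.Set.add st.2.1 item, st.2.2)
        else (PySem.Set.add st.1 item, st.2.1, st.2.2 ++ [item]))
      (PySem.Set.ofList p, D, PySem.Set.ofList p)).2.1 ↔ 2 ≤ (p ++ rs).count x) := by
  induction rs with
  | nil =>
    intro p D hN hm
    simp only [List.foldl_nil, List.append_nil]
    exact ⟨by simp, hN, hm⟩
  | cons a rs ih =>
    intro p D hN hm
    simp only [List.foldl_cons]
    by_cases ha : a ∈ PySem.Set.ofList p
    · have hc : PySem.Set.contains (PySem.Set.ofList p) a = true :=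
        (PySem.Set.contains_iff _ _).mpr ha
      have hap : a ∈ p := (PySem.Set.mem_ofList _ _).mp ha
      have hofl : PySem.Set.add (PySem.Set.ofList p) a = PySem.Set.ofList (p ++ [a]) :=
        (PySem.Set.ofList_append_singleton p a).symm
      have hself : PySem.Set.add (PySem.Set.ofList p) a = PySem.Set.ofList p :=
        PySem.Set.add_of_mem ha
      have h1 : ∀ x, x ∈ PySem.Set.add D a ↔ 2 ≤ (p ++ [a]).count x := by
        intro x
        rw [PySem.Set.mem_add, hm x]
        by_cases hx : x = a
        · subst hx
          have h1c : (p ++ [x]).count x = p.count x + 1 := by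
            simp [List.count_append]
          have h2c : 0 < p.count x := List.count_pos_iff.mpr hap
          rw [h1c]
          constructor
          · intro _; omega
          · intro _; exact Or.inr rfl
        · have h1c : (p ++ [a]).count x = p.count x := by
            simp [List.count_append, Ne.symm hx]
          rw [h1c]
          constructor
          · intro h
            rcases h with h | h
            · exact h
            · exact absurd h hx
          · intro h
            exact Or.inl h
      have hstep := ih (p ++ [a]) (PySem.Set.add D a) (PySem.Set.nodup_add D a hN) h1
      rw [hc, if_pos rfl]
      have hpa : p ++ a :: rs = (p ++ [a]) ++ rs := by simp
      rw [hpa]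
      have hrw : PySem.Set.ofList p = PySem.Set.ofList (p ++ [a]) := by
        rw [← hofl, hself]
      rw [hrw]
      exact hstep
    · have hc : PySem.Set.contains (PySem.Set.ofList p) a = false := by
        rw [Bool.eq_false_iff]
        intro h
        exact ha ((PySem.Set.contains_iff _ _).mp h)
      have hap : a ∉ p := fun h => ha ((PySem.Set.mem_ofList _ _).mpr h)
      have hofl : PySem.Set.add (PySem.Set.ofList p) a = PySem.Set.ofList (p ++ [a]) :=
        (PySem.Set.ofList_append_singleton p a).symm
      have happ : PySem.Set.add (PySem.Set.ofList p) a = PySem.Set.ofList p ++ [a] :=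
        PySem.Set.add_of_not_mem ha
      have h1 : ∀ x, x ∈ D ↔ 2 ≤ (p ++ [a]).count x := by
        intro x
        rw [hm x]
        by_cases hx : x = a
        · subst hx
          have h0 : p.count x = 0 := List.count_eq_zero.mpr hap
          have h1c : (p ++ [x]).count x = 1 := by
            simp [List.count_append, h0]
          rw [h1c]
          omega
        · have h1c : (p ++ [a]).count x = p.count x := by
            simp [List.count_append, Ne.symm hx]
          rw [h1c]
      have hstep := ih (p ++ [a]) D hN h1
      rw [hc, if_neg (by simp)]
      have hpa : p ++ a :: rs = (p ++ [a]) ++ rs := by simp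
      rw [hpa]
      rw [happ, show PySem.Set.ofList p ++ [a] = PySem.Set.ofList (p ++ [a]) from by rw [← happ, hofl]]
      exact hstep

-- B's duplicate list, before sorting, is the filter of set(strings) by count ≥ 2.
theorem pd_alt_dups (strings : List String) :
    (((strings.foldl (fun (d : PySem.Dict String Int) s => d.modify s 0 (· + 1)) PySem.Dict.empty).items.filter
        (fun p => 2 ≤ p.2)).map Prod.fst) =
      (PySem.Set.ofList strings).filter (fun k => 2 ≤ (strings.count k : Int)) := by
  have hcounter : (strings.foldl (fun (d : PySem.Dict String Int) s => d.modify s 0 (· + 1)) PySem.Dict.empty)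
      = PySem.Dict.counter strings := (PySem.Dict.counter_eq_foldl strings).symm
  rw [hcounter, PySem.Dict.items_counter]
  rw [List.filter_map, List.map_map]
  simp [Function.comp_def]

-- ===== VERDICT (by name: the statement is the Claim_ definition above) =====
theorem process_duplicates_spec : Claim_equal_process_duplicates := by
  unfold Claim_equal_process_duplicates Spec_process_duplicates
  intro strings _
  have hinv := pd_loop_inv strings [] [] List.nodup_nil (by simp)
  simp only [List.nil_append] at hinv
  obtain ⟨hres, hNod, hmem⟩ := hinv
  show process_duplicates strings = process_duplicates_alt strings
  unfold process_duplicates process_duplicates_alt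
  simp only []
  rw [pd_alt_dups]
  have hinit : (PySem.Set.empty (α := String), PySem.Set.empty (α := String), ([] : List String))
      = (PySem.Set.ofList ([] : List String), ([] : List String), PySem.Set.ofList ([] : List String)) := rfl
  rw [hinit]
  refine Prod.ext ?_ ?_
  · simpa [PySem.List.dedup_eq_ofList] using hres
  · -- both sorted lists: permutation of two nodup lists with equal membership
    apply PySem.List.sorted_eq_sorted_of_perm _ _ _ (fun _ _ h => h)
    apply (List.perm_ext_iff_of_nodup hNod (List.Nodup.filter _ (PySem.Set.nodup_ofList strings))).mpr
    intro x
    rw [hmem x]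
    simp only [List.mem_filter, PySem.Set.mem_ofList, decide_eq_true_eq]
    constructor
    · intro h
      refine ⟨List.count_pos_iff.mp (by omega), by exact_mod_cast h⟩
    · rintro ⟨-, h⟩
      exact_mod_cast h
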